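-- pv_equiv track=rewrite | github.com/birds-canopy/birdsong_tokenizer | src/visualisation_plots.py | count_token_presence_in_songs
-- ===== SOURCE A (Python) =====
-- def count_token_presence_in_songs(Y_clean, token):
--     """
--     Compte dans combien de chants le token apparaît.
--
--     Args:
--         Y_clean: liste contenant tous les chants séparés par '#'
--         token: le token à chercher (ex: 'ZAB')
--
--     Returns:
--         nombre de chants contenant ce token
--     """
--     # Séparer les chants (diviser par '#')
--     songs = []
--     current_song = []
--
--     for label in Y_clean:
--         if label == '#':
--             if current_song:  # Si le chant n'est pas vide
--                 songs.append(current_song)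
--                 current_song = []
--         else:
--             current_song.append(label)
--
--     # Ajouter le dernier chant si il n'y a pas de '#' à la fin
--     if current_song:
--         songs.append(current_song)
--
--     # Compter dans combien de chants le token apparaît
--     count = 0
--     token_sequence = list(token)  # Convertir 'ZAB' en ['Z', 'A', 'B']
--
--     for song in songs:
--         # Chercher la séquence dans le chant
--         for i in range(len(song) - len(token_sequence) + 1):
--             if song[i:i+len(token_sequence)] == token_sequence:
--                 count += 1
--                 break  # On compte une seule fois par chant
--
--     return count
-- ===== SOURCE B (Python) =====
-- def count_token_presence_in_songs(Y_clean, token):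
--     """Single streaming pass with a sentinel flush: no intermediate songs list is
--     built; containment is tested by sliding off the head of the song (prefix test
--     on each suffix) instead of indexed slice comparisons."""
--     seq = list(token)
--
--     def song_contains(song):
--         suffix = song
--         while len(suffix) >= len(seq):
--             if suffix[:len(seq)] == seq:
--                 return True
--             suffix = suffix[1:]
--         return False
--
--     count = 0
--     song = []
--     for label in Y_clean + ['#']:  # sentinel '#' flushes the final song
--         if label == '#':
--             if song and song_contains(song):
--                 count += 1
--             song = []
--         else:
--             song.append(label)
--     return count
-- ===== Notes on version B (the rewrite author's own statement) =====
-- stated objective: alternative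
-- what changed: A builds an explicit list of songs in one phase and then searches each song with an indexed range of slice comparisons; B is a single streaming pass over the labels with a sentinel '#' flush that never materialises a songs list, and tests containment by a prefix check on successive suffixes of the current song.
import Mathlib
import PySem

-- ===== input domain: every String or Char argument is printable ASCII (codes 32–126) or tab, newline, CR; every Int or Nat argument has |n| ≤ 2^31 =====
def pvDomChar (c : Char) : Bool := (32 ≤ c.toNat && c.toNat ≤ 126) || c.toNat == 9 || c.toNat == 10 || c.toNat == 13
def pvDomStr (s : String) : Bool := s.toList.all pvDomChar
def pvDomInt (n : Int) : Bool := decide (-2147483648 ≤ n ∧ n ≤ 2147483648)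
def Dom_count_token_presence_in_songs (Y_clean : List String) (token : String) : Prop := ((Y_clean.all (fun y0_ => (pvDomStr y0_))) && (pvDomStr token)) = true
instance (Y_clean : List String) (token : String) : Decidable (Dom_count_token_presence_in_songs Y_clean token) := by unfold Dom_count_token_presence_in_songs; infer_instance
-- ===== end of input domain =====

-- B replaces A's two-phase pass (build a songs list, then an indexed slice-compare search per song)
-- by a single streaming pass with a sentinel flush and a prefix-of-suffix containment test (objective: alternative).

-- ===== PORT A =====
-- inner 'for i in range(...): if song[i:i+m] == seq: count += 1; break'  (break ≡ any)
def pvSearchA (song seq : List String) : Bool :=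
  (PySem.List.pyRange 0 ((song.length : Int) - (seq.length : Int) + 1) 1).any
    (fun i => PySem.List.slice song (some i) (some (i + (seq.length : Int))) == seq)

def count_token_presence_in_songs (Y_clean : List String) (token : String) : Int :=
  let st := Y_clean.foldl (fun (st : List (List String) × List String) label =>
      if label = "#" then
        if st.2 ≠ [] then (st.1 ++ [st.2], ([] : List String)) else st
      else (st.1, st.2 ++ [label])) ([], [])
  let songs := if st.2 ≠ [] then st.1 ++ [st.2] else st.1
  let seq := token.toList.map (fun c => String.ofList [c])
  songs.foldl (fun count song => if pvSearchA song seq then count + 1 else count) (0 : Int)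

-- ===== PORT B =====
-- 'while len(suffix) >= len(seq): if suffix[:len(seq)] == seq: return True; suffix = suffix[1:]'
def pvContainsB (seq : List String) (suffix : List String) : Bool :=
  if h : seq.length ≤ suffix.length then
    if hp : suffix.take seq.length == seq then true
    else pvContainsB seq (suffix.drop 1)
  else false
termination_by suffix.length
decreasing_by
  cases suffix with
  | nil =>
      exfalso
      apply hp
      have hm : seq = [] := List.eq_nil_of_length_eq_zero (Nat.le_zero.mp h)
      simp [hm]
  | cons a l => simp

def count_token_presence_in_songs_alt (Y_clean : List String) (token : String) : Int :=
  let seq := token.toList.map (fun c => String.ofList [c])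
  ((Y_clean ++ ["#"]).foldl (fun (st : Int × List String) label =>
      if label = "#" then
        (if st.2 ≠ [] ∧ pvContainsB seq st.2 = true then st.1 + 1 else st.1, [])
      else (st.1, st.2 ++ [label])) ((0 : Int), ([] : List String))).1

-- ===== PRECONDITION & SPEC =====
def Spec_count_token_presence_in_songs (Y_clean : List String) (token : String) (out : Int) : Prop := out = count_token_presence_in_songs_alt Y_clean token
instance (Y_clean : List String) (token : String) (out : Int) : Decidable (Spec_count_token_presence_in_songs Y_clean token out) := by unfold Spec_count_token_presence_in_songs; infer_instance

-- ===== CLAIM (what is proved, stated in full; the proofs are below) =====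
def Claim_equal_count_token_presence_in_songs : Prop := ∀ (Y_clean : List String) (token : String), Dom_count_token_presence_in_songs Y_clean token → Spec_count_token_presence_in_songs Y_clean token (count_token_presence_in_songs Y_clean token)

-- ===== LEMMAS AND PROOFS =====

-- both containment tests decide '∃ k, k + |seq| ≤ |song| ∧ (song.drop k).take |seq| = seq'
theorem pvSearchA_iff (song seq : List String) :
    pvSearchA song seq = true ↔
      ∃ k : Nat, k + seq.length ≤ song.length ∧ (song.drop k).take seq.length = seq := by
  unfold pvSearchA
  rw [List.any_eq_true]
  constructor
  · rintro ⟨i, hi, hslice⟩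
    rw [PySem.List.mem_pyRange_one] at hi
    obtain ⟨h0, hlt⟩ := hi
    refine ⟨i.toNat, by omega, ?_⟩
    rw [PySem.List.slice_toNat song h0 (by omega)] at hslice
    rw [beq_iff_eq] at hslice
    have hlen : ((i + (seq.length : Int)).toNat - i.toNat) = seq.length := by omega
    rwa [hlen] at hslice
  · rintro ⟨k, hk, heq⟩
    refine ⟨(k : Int), ?_, ?_⟩
    · rw [PySem.List.mem_pyRange_one]; constructor <;> omega
    · rw [PySem.List.slice_toNat song (by positivity) (by positivity)]
      rw [beq_iff_eq]
      have hlen : (((k : Int) + (seq.length : Int)).toNat - (k : Int).toNat) = seq.length := by omega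
      have hkn : (k : Int).toNat = k := by omega
      rw [hlen, hkn]
      exact heq

theorem pvContainsB_iff (seq : List String) : ∀ (s : List String),
    pvContainsB seq s = true ↔
      ∃ k : Nat, k + seq.length ≤ s.length ∧ (s.drop k).take seq.length = seq := by
  intro s
  induction s with
  | nil =>
      rw [pvContainsB]
      by_cases h : seq.length ≤ ([] : List String).length
      · have hm : seq = [] := List.eq_nil_of_length_eq_zero (Nat.le_zero.mp h)
        simp [hm]
      · rw [dif_neg h]
        simp only [Bool.false_eq_true, false_iff]
        rintro ⟨k, hk, -⟩
        simp only [List.length_nil] at hk h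
        omega
  | cons a l ih =>
      rw [pvContainsB]
      by_cases h : seq.length ≤ (a :: l).length
      · simp only [h, dif_pos]
        by_cases hp : (a :: l).take seq.length == seq
        · simp only [hp, dif_pos, true_iff]
          exact ⟨0, by simpa using h, by simpa using (beq_iff_eq.mp hp)⟩
        · rw [dif_neg hp]
          rw [show (a :: l).drop 1 = l from rfl, ih]
          constructor
          · rintro ⟨k, hk, he⟩
            exact ⟨k + 1, by simp; omega, by simpa using he⟩
          · rintro ⟨k, hk, he⟩
            cases k with
            | zero =>
                exfalso
                exact hp (beq_iff_eq.mpr (by simpa using he))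
            | succ k' =>
                exact ⟨k', by simp at hk ⊢; omega, by simpa using he⟩
      · rw [dif_neg h]
        simp only [Bool.false_eq_true, false_iff]
        rintro ⟨k, hk, -⟩
        simp at h hk
        omega

theorem pvContains_eq (seq song : List String) : pvContainsB seq song = pvSearchA song seq := by
  by_cases hb : pvSearchA song seq = true
  · rw [hb]
    exact (pvContainsB_iff seq song).mpr ((pvSearchA_iff song seq).mp hb)
  · have h2 : ¬ pvContainsB seq song = true :=
      fun hc => hb ((pvSearchA_iff song seq).mpr ((pvContainsB_iff seq song).mp hc))
    simp only [Bool.not_eq_true] at hb h2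
    rw [hb, h2]

-- A's split step and its songs-accumulator factoring
def pvStepA (st : List (List String) × List String) (label : String) : List (List String) × List String :=
  if label = "#" then
    if st.2 ≠ [] then (st.1 ++ [st.2], ([] : List String)) else st
  else (st.1, st.2 ++ [label])

theorem pvFoldA_factor : ∀ (labels : List String) (songs : List (List String)) (cur : List String),
    labels.foldl pvStepA (songs, cur)
      = (songs ++ (labels.foldl pvStepA ([], cur)).1, (labels.foldl pvStepA ([], cur)).2) := by
  intro labels
  induction labels with
  | nil => intro songs cur; simp
  | cons a rest ih =>
      intro songs cur
      simp only [List.foldl_cons, pvStepA]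
      by_cases ha : a = "#"
      · by_cases hc : cur ≠ []
        · simp only [ha, if_true, if_pos hc, List.nil_append]
          rw [ih (songs ++ [cur]) [], ih [cur] []]
          simp
        · simp only [ha, if_true, if_neg hc]
          exact ih songs cur
      · simp only [if_neg ha]
        exact ih songs (cur ++ [a])

def pvFinalize (st : List (List String) × List String) : List (List String) :=
  if st.2 ≠ [] then st.1 ++ [st.2] else st.1

-- B's streaming fold counts exactly the finalized songs of A's split
theorem pvFoldB_eq (seq : List String) :
    ∀ (labels : List String) (cur : List String) (c : Int),
    (labels ++ ["#"]).foldl (fun (st : Int × List String) label =>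
        if label = "#" then
          (if st.2 ≠ [] ∧ pvContainsB seq st.2 = true then st.1 + 1 else st.1, [])
        else (st.1, st.2 ++ [label])) (c, cur)
      = (c + ((pvFinalize (labels.foldl pvStepA ([], cur))).countP (fun s => pvSearchA s seq) : Int), []) := by
  intro labels
  induction labels with
  | nil =>
      intro cur c
      by_cases hc : cur ≠ []
      · cases hs : pvSearchA cur seq with
        | true => simp [pvFinalize, hc, pvContains_eq, hs]
        | false => simp [pvFinalize, hc, pvContains_eq, hs]
      · simp at hc
        simp [pvFinalize, hc]
  | cons a rest ih =>
      intro cur c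
      simp only [List.cons_append, List.foldl_cons]
      by_cases ha : a = "#"
      · subst ha
        simp only [if_true]
        rw [ih []]
        simp only [pvStepA, if_true, List.nil_append]
        by_cases hc : cur ≠ []
        · rw [if_pos hc, pvFoldA_factor rest [cur] []]
          have hfin : pvFinalize ([cur] ++ (rest.foldl pvStepA ([], [])).1, (rest.foldl pvStepA ([], [])).2)
              = [cur] ++ pvFinalize (rest.foldl pvStepA ([], [])) := by
            by_cases h2 : (rest.foldl pvStepA ([], [])).2 ≠ [] <;> simp [pvFinalize, h2]
          rw [hfin, List.countP_append]
          cases hs : pvSearchA cur seq with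
          | true =>
              rw [if_pos ⟨hc, by rw [pvContains_eq, hs]⟩]
              simp [hs]
              ring
          | false =>
              rw [if_neg (by rw [pvContains_eq, hs]; simp)]
              simp [hs]
        · rw [if_neg hc, if_neg (fun h => hc h.1)]
          simp at hc
          simp [hc]
      · simp only [if_neg ha]
        rw [ih (cur ++ [a])]
        simp [pvStepA, ha]

-- ===== VERDICT (by name: the statement is the Claim_ definition above) =====
theorem count_token_presence_in_songs_spec : Claim_equal_count_token_presence_in_songs := by
  intro Y_clean token _
  unfold Spec_count_token_presence_in_songs
  simp only [count_token_presence_in_songs, count_token_presence_in_songs_alt]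
  rw [pvFoldB_eq]
  rw [PySem.List.foldl_if_add_one]
  simp only [pvFinalize]
  have hstep : (fun (st : List (List String) × List String) label =>
      if label = "#" then
        if st.2 ≠ [] then (st.1 ++ [st.2], ([] : List String)) else st
      else (st.1, st.2 ++ [label])) = pvStepA := rfl
  rw [hstep]
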